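-- pv_equiv track=rewrite | github.com/kilian-hu/hackerrank-solutions | certificates/problem-solving-intermediate/hotel-construction/solution.py | numberOfWays
-- ===== SOURCE A (Python) =====
-- def numberOfWays(roads):
--     n = len(roads) + 1
--     adj = [[] for _ in range(n)]
--     for i, j in roads:
--         adj[i - 1].append(j - 1)
--         adj[j - 1].append(i - 1)
--     ans = 0
--
--     def dfs(x, d):
--         dist[x] = d
--         for y in adj[x]:
--             if dist[y] == -1:
--                 dfs(y, d + 1)
--
--     # Brute force.
--     for i in range(n - 2):
--         for j in range(i + 1, n - 1):
--             for k in range(j + 1, n):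
--                 dist = [-1 for _ in range(n)]
--                 dfs(i, 0)
--                 if dist[j] != dist[k]:
--                     continue
--                 dist = [-1 for _ in range(n)]
--                 dfs(j, 0)
--                 if dist[i] == dist[k]:
--                     ans += 1
--     return ans
-- ===== SOURCE B (Python) =====
-- def numberOfWays(roads):
--     n = len(roads) + 1
--     adj = [[] for _ in range(n)]
--     for a, b in roads:
--         adj[a - 1].append(b - 1)
--         adj[b - 1].append(a - 1)
--
--     def distances(root):
--         dist = [-1] * n
--         def go(x, d):
--             dist[x] = d
--             for y in adj[x]:
--                 if dist[y] == -1: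
--                     go(y, d + 1)
--         go(root, 0)
--         return dist
--
--     # Distance table computed once per node instead of once per triple.
--     T = [distances(r) for r in range(n)]
--     return sum(1
--                for i in range(n - 2)
--                for j in range(i + 1, n - 1)
--                for k in range(j + 1, n)
--                if T[i][j] == T[i][k] and T[j][i] == T[j][k])
-- ===== Notes on version B (the rewrite author's own statement) =====
-- stated objective: faster
-- what changed: B computes the DFS distance table once per node (memoized, O(n^2)) and counts the triples by pure table lookups, instead of A's rerunning two full DFS traversals from scratch inside every (i,j,k) triple.
import Mathlib
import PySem

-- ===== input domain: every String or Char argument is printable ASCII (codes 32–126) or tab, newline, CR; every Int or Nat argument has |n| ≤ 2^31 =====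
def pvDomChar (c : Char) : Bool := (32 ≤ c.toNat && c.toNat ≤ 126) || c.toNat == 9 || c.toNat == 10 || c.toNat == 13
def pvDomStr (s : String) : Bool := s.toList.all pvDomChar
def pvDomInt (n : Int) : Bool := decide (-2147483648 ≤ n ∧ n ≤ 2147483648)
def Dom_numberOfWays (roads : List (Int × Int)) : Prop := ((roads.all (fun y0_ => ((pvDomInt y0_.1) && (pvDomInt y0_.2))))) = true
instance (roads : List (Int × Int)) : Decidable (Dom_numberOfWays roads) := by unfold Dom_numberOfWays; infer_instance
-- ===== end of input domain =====

-- B memoizes the per-node DFS distance table once (O(n^2)) instead of rerunning two DFS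
-- traversals for every triple as A does; the triple count is then pure table lookups (faster).

-- ===== PORT A =====
-- Python index i-1 into a list of length n (negative values wrap); exact for -n ≤ i-1 < n,
-- which Pre_ guarantees.
def pvIdx (z : Int) (n : Nat) : Nat := if z < 0 then (z + n).toNat else z.toNat

-- the adjacency-building loop shared verbatim by both Pythons
def pvBuildAdj (roads : List (Int × Int)) (n : Nat) : List (List Nat) :=
  roads.foldl (fun adj p =>
    let a := pvIdx (p.1 - 1) n
    let b := pvIdx (p.2 - 1) n
    (adj.modify a (fun l => l ++ [b])).modify b (fun l => l ++ [a]))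
    (List.replicate n [])

-- the recursive dfs of both Pythons; fuel n is exact: each nested call is made on a node whose
-- dist entry is -1 and immediately sets it, so the recursion can never be more than n deep.
def pvDfs (adj : List (List Nat)) : Nat → Nat → Int → List Int → List Int
  | 0, _, _, dist => dist
  | fuel + 1, x, d, dist =>
    (adj.getD x []).foldl (fun dist y =>
      if dist.getD y 0 = -1 then pvDfs adj fuel y (d + 1) dist else dist) (dist.set x d)

def numberOfWays (roads : List (Int × Int)) : Int :=
  let n := roads.length + 1
  let adj := pvBuildAdj roads n
  (List.range' 0 (n - 2)).foldl (fun ans i =>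
    (List.range' (i + 1) (n - 2 - i)).foldl (fun ans j =>
      (List.range' (j + 1) (n - 1 - j)).foldl (fun ans k =>
        let dist := pvDfs adj n i 0 (List.replicate n (-1))
        if dist.getD j 0 ≠ dist.getD k 0 then ans
        else
          let dist2 := pvDfs adj n j 0 (List.replicate n (-1))
          if dist2.getD i 0 = dist2.getD k 0 then ans + 1 else ans) ans) ans) 0

-- ===== PORT B =====
def numberOfWays_alt (roads : List (Int × Int)) : Int :=
  let n := roads.length + 1
  let adj := pvBuildAdj roads n
  let T := (List.range n).map (fun r => pvDfs adj n r 0 (List.replicate n (-1)))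
  ((List.range' 0 (n - 2)).map (fun i =>
    ((List.range' (i + 1) (n - 2 - i)).map (fun j =>
      (((List.range' (j + 1) (n - 1 - j)).countP (fun k =>
        decide ((T.getD i []).getD j 0 = (T.getD i []).getD k 0 ∧
                (T.getD j []).getD i 0 = (T.getD j []).getD k 0)) : Nat) : Int))).sum)).sum

-- ===== PRECONDITION & SPEC =====
-- Pre_ excludes exactly the inputs on which Python A raises IndexError: a road endpoint whose
-- 0-based index i-1 falls outside Python's valid range [-n, n-1] for the length-n adjacency list.
def Pre_numberOfWays (roads : List (Int × Int)) : Prop :=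
  ∀ p ∈ roads, 1 - ((roads.length : Int) + 1) ≤ p.1 ∧ p.1 ≤ (roads.length : Int) + 1 ∧
               1 - ((roads.length : Int) + 1) ≤ p.2 ∧ p.2 ≤ (roads.length : Int) + 1
instance (roads : List (Int × Int)) : Decidable (Pre_numberOfWays roads) := by
  unfold Pre_numberOfWays; infer_instance

def pvWitness_numberOfWays : (List (Int × Int)) := [(1, 2), (2, 3)]

def Spec_numberOfWays (roads : List (Int × Int)) (out : Int) : Prop := out = numberOfWays_alt roads
instance (roads : List (Int × Int)) (out : Int) : Decidable (Spec_numberOfWays roads out) := by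
  unfold Spec_numberOfWays; infer_instance

-- ===== CLAIM (what is proved, stated in full; the proofs are below) =====
def Claim_equal_numberOfWays : Prop := ∀ (roads : List (Int × Int)), Dom_numberOfWays roads → Pre_numberOfWays roads → Spec_numberOfWays roads (numberOfWays roads)

-- ===== LEMMAS AND PROOFS =====

-- row lookup in B's memo table is the dfs result
theorem pv_getD_map_range {α : Type} (f : Nat → α) (d : α) {i n : Nat} (h : i < n) :
    ((List.range n).map f).getD i d = f i := by
  rw [List.getD_eq_getElem _ _ (by simp [h])]
  simp

-- A's two-test branch body is a single conjunctive count step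
theorem pv_branch (a b c d ans : Int) :
    (if a ≠ b then ans else if c = d then ans + 1 else ans)
      = if a = b ∧ c = d then ans + 1 else ans := by
  by_cases h1 : a = b <;> by_cases h2 : c = d <;> simp [h1, h2]

-- the heart of the proof: for any n and adjacency list, A's re-running triple loop equals
-- B's memoized triple count
theorem pv_main (n : Nat) (adj : List (List Nat)) :
    (List.range' 0 (n - 2)).foldl (fun ans i =>
      (List.range' (i + 1) (n - 2 - i)).foldl (fun ans j =>
        (List.range' (j + 1) (n - 1 - j)).foldl (fun ans k =>
          let dist := pvDfs adj n i 0 (List.replicate n (-1))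
          if dist.getD j 0 ≠ dist.getD k 0 then ans
          else
            let dist2 := pvDfs adj n j 0 (List.replicate n (-1))
            if dist2.getD i 0 = dist2.getD k 0 then ans + 1 else ans) ans) ans) 0
    = ((List.range' 0 (n - 2)).map (fun i =>
        ((List.range' (i + 1) (n - 2 - i)).map (fun j =>
          (((List.range' (j + 1) (n - 1 - j)).countP (fun k =>
            decide (((((List.range n).map (fun r => pvDfs adj n r 0 (List.replicate n (-1)))).getD i []).getD j 0
                      = (((List.range n).map (fun r => pvDfs adj n r 0 (List.replicate n (-1)))).getD i []).getD k 0) ∧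
                    ((((List.range n).map (fun r => pvDfs adj n r 0 (List.replicate n (-1)))).getD j []).getD i 0
                      = (((List.range n).map (fun r => pvDfs adj n r 0 (List.replicate n (-1)))).getD j []).getD k 0))) : Nat) : Int))).sum)).sum := by
  set D := fun r => pvDfs adj n r 0 (List.replicate n (-1)) with hD
  set T := (List.range n).map D with hT
  have hTget : ∀ {r : Nat}, r < n → T.getD r [] = D r := by
    intro r hr; rw [hT]; exact pv_getD_map_range D [] hr
  rw [PySem.List.foldl_congr_mem _ _
    (fun ans i => ans + ((List.range' (i + 1) (n - 2 - i)).map (fun j =>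
      (((List.range' (j + 1) (n - 1 - j)).countP (fun k =>
        decide (((T.getD i []).getD j 0 = (T.getD i []).getD k 0) ∧
                ((T.getD j []).getD i 0 = (T.getD j []).getD k 0))) : Nat) : Int))).sum) 0 ?_]
  · rw [PySem.List.foldl_add]
    simp
  · intro acc i hi
    rw [List.mem_range'_1] at hi
    rw [PySem.List.foldl_congr_mem _ _
      (fun ans j => ans + (((List.range' (j + 1) (n - 1 - j)).countP (fun k =>
        decide (((T.getD i []).getD j 0 = (T.getD i []).getD k 0) ∧
                ((T.getD j []).getD i 0 = (T.getD j []).getD k 0))) : Nat) : Int)) acc ?_]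
    · rw [PySem.List.foldl_add]
    · intro ans j hj
      rw [List.mem_range'_1] at hj
      rw [PySem.List.foldl_congr_mem _ _
        (fun ans k => if ((D i).getD j 0 = (D i).getD k 0) ∧ ((D j).getD i 0 = (D j).getD k 0)
                      then ans + 1 else ans) ans ?_]
      · rw [PySem.List.foldl_ite_add_one]
        congr 2
        apply List.countP_congr
        intro k hk
        rw [List.mem_range'_1] at hk
        have hi' : i < n := by omega
        have hj' : j < n := by omega
        have hk' : k < n := by omega
        simp only [hTget hi', hTget hj', decide_eq_true_eq]
      · intro ans k hk
        exact pv_branch _ _ _ _ ans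

-- ===== VERDICT (by name: the statement is the Claim_ definition above) =====
theorem numberOfWays_spec : Claim_equal_numberOfWays := by
  intro roads _ _
  unfold Spec_numberOfWays numberOfWays numberOfWays_alt
  exact pv_main (roads.length + 1) (pvBuildAdj roads (roads.length + 1))
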